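-- pv_equiv track=rewrite | github.com/gh0stintheshe11/LeetCode-Solutions | solutions/2629.number-of-substrings-with-fixed-ratio/Python3.py | fixedRatio
-- ===== SOURCE A (Python) =====
-- def fixedRatio(s: str, num1: int, num2: int) -> int:
--     from collections import defaultdict
--
--     count = 0
--     prefix_count_map = defaultdict(int)
--     prefix_count_map[0] = 1
--
--     zero_count = 0
--     one_count = 0
--
--     for char in s:
--         if char == '0':
--             zero_count += 1
--         else:
--             one_count += 1
--
--         # Solve the equation Func(R) * (num1 + num2) - R * num1
--         key = zero_count * num2 - one_count * num1
--
--         # Use hashmap to find how many such L exist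
--         if key in prefix_count_map:
--             count += prefix_count_map[key]
--
--         # Update hashmap with current position
--         prefix_count_map[key] += 1
--
--     return count
-- ===== SOURCE B (Python) =====
-- def fixedRatio(s: str, num1: int, num2: int) -> int:
--     # Nested rescanning: for each start position, scan to the end keeping
--     # running zero/one counts; no prefix hashmap at all.
--     total = 0
--     for start in range(len(s)):
--         zero = 0
--         one = 0
--         for ch in s[start:]:
--             if ch == '0':
--                 zero += 1
--             else:
--                 one += 1
--             if zero * num2 == one * num1:
--                 total += 1
--     return total
-- ===== Notes on version B (the rewrite author's own statement) =====
-- stated objective: simpler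
-- what changed: Replaced the prefix-key hashmap single pass by a plain nested double loop that rescans each suffix with running zero/one counts, dropping the hashmap and prefix-difference reasoning entirely.
import Mathlib
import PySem

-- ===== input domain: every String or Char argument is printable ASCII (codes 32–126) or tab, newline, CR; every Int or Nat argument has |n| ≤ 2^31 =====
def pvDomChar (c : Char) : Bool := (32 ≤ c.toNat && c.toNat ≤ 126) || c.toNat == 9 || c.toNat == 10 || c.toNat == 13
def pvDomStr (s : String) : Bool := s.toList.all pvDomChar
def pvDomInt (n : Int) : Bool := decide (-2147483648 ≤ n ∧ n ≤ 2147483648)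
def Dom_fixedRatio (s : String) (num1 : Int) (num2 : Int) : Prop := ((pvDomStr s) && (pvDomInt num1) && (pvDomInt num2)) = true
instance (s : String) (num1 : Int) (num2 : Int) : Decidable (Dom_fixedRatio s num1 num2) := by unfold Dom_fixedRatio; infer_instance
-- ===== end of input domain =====

-- B replaces A's prefix-key hashmap single pass by a plain nested double loop
-- rescanning each suffix with running zero/one counts (simpler, no hashmap; not faster).

-- ===== PORT A =====
def fixedRatio (s : String) (num1 : Int) (num2 : Int) : Int :=
  (s.toList.foldl
    (fun (st : PySem.Dict Int Int × Int × Int × Int) char =>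
      let z := if char = '0' then st.2.1 + 1 else st.2.1
      let o := if char = '0' then st.2.2.1 else st.2.2.1 + 1
      let key := z * num2 - o * num1
      let cnt := if st.1.contains key then st.2.2.2 + st.1.getD key 0 else st.2.2.2
      (st.1.insert key (st.1.getD key 0 + 1), z, o, cnt))
    (PySem.Dict.empty.insert 0 1, 0, 0, 0)).2.2.2

-- ===== PORT B =====
def fixedRatio_alt (s : String) (num1 : Int) (num2 : Int) : Int :=
  (List.range s.toList.length).foldl
    (fun (total : Int) (start : Nat) =>
      ((PySem.List.slice s.toList (some (start : Int)) none).foldl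
        (fun (st : Int × Int × Int) ch =>
          let z := if ch = '0' then st.1 + 1 else st.1
          let o := if ch = '0' then st.2.1 else st.2.1 + 1
          (z, o, if z * num2 = o * num1 then st.2.2 + 1 else st.2.2))
        (0, 0, total)).2.2)
    0

-- ===== PRECONDITION & SPEC =====
def Spec_fixedRatio (s : String) (num1 : Int) (num2 : Int) (out : Int) : Prop := out = fixedRatio_alt s num1 num2
instance (s : String) (num1 : Int) (num2 : Int) (out : Int) : Decidable (Spec_fixedRatio s num1 num2 out) := by unfold Spec_fixedRatio; infer_instance

-- ===== CLAIM (what is proved, stated in full; the proofs are below) =====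
def Claim_equal_fixedRatio : Prop := ∀ (s : String) (num1 : Int) (num2 : Int), Dom_fixedRatio s num1 num2 → Spec_fixedRatio s num1 num2 (fixedRatio s num1 num2)

-- ===== LEMMAS AND PROOFS =====

-- key increment contributed by one character
def pvStep (num1 num2 : Int) (c : Char) : Int := if c = '0' then num2 else -num1

-- number of nonempty prefixes of l whose accumulated key (starting from a) hits 0
def pvCnt (num1 num2 : Int) : Int → List Char → Int
  | _, [] => 0
  | a, c :: l => (if a + pvStep num1 num2 c = 0 then 1 else 0) + pvCnt num1 num2 (a + pvStep num1 num2 c) l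

-- abstract form of A's loop: a = current key, seen = multiset of keys of all prefixes so far
def pvGo (num1 num2 : Int) : Int → List Int → List Char → Int
  | _, _, [] => 0
  | a, seen, c :: l =>
      ((seen.count (a + pvStep num1 num2 c) : Int)) +
        pvGo num1 num2 (a + pvStep num1 num2 c) ((a + pvStep num1 num2 c) :: seen) l

-- pairs among strictly future prefixes
def pvG (num1 num2 : Int) : List Char → Int
  | [] => 0
  | _ :: l => pvCnt num1 num2 0 l + pvG num1 num2 l

-- abstract form of B: sum over all suffixes
def pvB (num1 num2 : Int) : List Char → Int
  | [] => 0
  | c :: l => pvCnt num1 num2 0 (c :: l) + pvB num1 num2 l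

-- matches between seen prefixes and future prefixes
def pvS (num1 num2 a : Int) (seen : List Int) (l : List Char) : Int :=
  (seen.map (fun x => pvCnt num1 num2 (a - x) l)).sum

lemma pvA_fold (num1 num2 : Int) : ∀ (l : List Char) (d : PySem.Dict Int Int) (z o cnt : Int) (seen : List Int),
    (∀ k : Int, d.getD k 0 = (seen.count k : Int)) →
    (∀ k : Int, d.contains k = true ↔ k ∈ seen) →
    (l.foldl
      (fun (st : PySem.Dict Int Int × Int × Int × Int) char =>
        let z := if char = '0' then st.2.1 + 1 else st.2.1
        let o := if char = '0' then st.2.2.1 else st.2.2.1 + 1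
        let key := z * num2 - o * num1
        let cnt := if st.1.contains key then st.2.2.2 + st.1.getD key 0 else st.2.2.2
        (st.1.insert key (st.1.getD key 0 + 1), z, o, cnt))
      (d, z, o, cnt)).2.2.2
    = cnt + pvGo num1 num2 (z * num2 - o * num1) seen l := by
  intro l
  induction l with
  | nil => intro d z o cnt seen _ _; simp [pvGo]
  | cons c l ih =>
    intro d z o cnt seen hget hmem
    by_cases hc : c = '0'
    · simp only [List.foldl_cons, hc, if_true]
      have hcnt' : (if d.contains ((z + 1) * num2 - o * num1) then cnt + d.getD ((z + 1) * num2 - o * num1) 0 else cnt)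
          = cnt + (seen.count ((z + 1) * num2 - o * num1) : Int) := by
        by_cases hm : d.contains ((z + 1) * num2 - o * num1)
        · rw [if_pos hm, hget]
        · rw [if_neg hm]
          have hnm : (z + 1) * num2 - o * num1 ∉ seen := fun h => hm ((hmem _).mpr h)
          rw [List.count_eq_zero.mpr hnm]
          simp
      rw [ih _ (z + 1) o _ (((z + 1) * num2 - o * num1) :: seen) ?hg ?hm]
      case hg =>
        intro k
        rw [PySem.Dict.getD_insert]
        by_cases hk : k = (z + 1) * num2 - o * num1
        · rw [if_pos hk, hk, hget, List.count_cons_self]; push_cast; ring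
        · rw [if_neg hk, hget]; simp [Ne.symm hk]
      case hm =>
        intro k
        rw [PySem.Dict.contains_insert]
        simp [beq_iff_eq, hmem k, List.mem_cons]
      rw [hcnt', pvGo]
      simp only [pvStep, if_true]
      have ha : z * num2 - o * num1 + num2 = (z + 1) * num2 - o * num1 := by ring
      rw [ha]
      ring
    · simp only [List.foldl_cons, hc, if_false]
      have hcnt' : (if d.contains (z * num2 - (o + 1) * num1) then cnt + d.getD (z * num2 - (o + 1) * num1) 0 else cnt)
          = cnt + (seen.count (z * num2 - (o + 1) * num1) : Int) := by
        by_cases hm : d.contains (z * num2 - (o + 1) * num1)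
        · rw [if_pos hm, hget]
        · rw [if_neg hm]
          have hnm : z * num2 - (o + 1) * num1 ∉ seen := fun h => hm ((hmem _).mpr h)
          rw [List.count_eq_zero.mpr hnm]
          simp
      rw [ih _ z (o + 1) _ ((z * num2 - (o + 1) * num1) :: seen) ?hg ?hm]
      case hg =>
        intro k
        rw [PySem.Dict.getD_insert]
        by_cases hk : k = z * num2 - (o + 1) * num1
        · rw [if_pos hk, hk, hget, List.count_cons_self]; push_cast; ring
        · rw [if_neg hk, hget]; simp [Ne.symm hk]
      case hm =>
        intro k
        rw [PySem.Dict.contains_insert]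
        simp [beq_iff_eq, hmem k, List.mem_cons]
      rw [hcnt', pvGo]
      simp only [pvStep, hc, if_false]
      have ha : z * num2 - o * num1 + -num1 = z * num2 - (o + 1) * num1 := by ring
      rw [ha]
      ring







lemma pvS_cons (num1 num2 a : Int) (seen : List Int) (c : Char) (l : List Char) :
    pvS num1 num2 a seen (c :: l)
      = (seen.count (a + pvStep num1 num2 c) : Int) + pvS num1 num2 (a + pvStep num1 num2 c) seen l := by
  induction seen with
  | nil => simp [pvS]
  | cons y ys ih =>
    simp only [pvS, List.map_cons, List.sum_cons, List.count_cons] at ih ⊢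
    have h1 : a - y + pvStep num1 num2 c = a + pvStep num1 num2 c - y := by ring
    rw [pvCnt, h1]
    have h2 : (a + pvStep num1 num2 c - y = 0) ↔ (a + pvStep num1 num2 c = y) := by omega
    by_cases hy : a + pvStep num1 num2 c = y
    · simp [hy, ih]; ring
    · simp [hy, h2, ih, Ne.symm hy]; ring

lemma pvGo_eq (num1 num2 : Int) : ∀ (l : List Char) (a : Int) (seen : List Int),
    pvGo num1 num2 a seen l = pvS num1 num2 a seen l + pvG num1 num2 l := by
  intro l
  induction l with
  | nil => intro a seen; simp [pvGo, pvS, pvCnt, pvG]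
  | cons c l ih =>
    intro a seen
    rw [pvGo, ih, pvS_cons, pvG]
    have : pvS num1 num2 (a + pvStep num1 num2 c) ((a + pvStep num1 num2 c) :: seen) l
        = pvCnt num1 num2 0 l + pvS num1 num2 (a + pvStep num1 num2 c) seen l := by
      simp [pvS]
    rw [this]
    ring

lemma pvB_eq (num1 num2 : Int) : ∀ l : List Char,
    pvB num1 num2 l = pvCnt num1 num2 0 l + pvG num1 num2 l := by
  intro l
  induction l with
  | nil => simp [pvB, pvCnt, pvG]
  | cons c l ih => rw [pvB, ih, pvG]

lemma pvB_fold_inner (num1 num2 : Int) : ∀ (l : List Char) (z o t : Int),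
    (l.foldl
      (fun (st : Int × Int × Int) ch =>
        let z := if ch = '0' then st.1 + 1 else st.1
        let o := if ch = '0' then st.2.1 else st.2.1 + 1
        (z, o, if z * num2 = o * num1 then st.2.2 + 1 else st.2.2))
      (z, o, t)).2.2
    = t + pvCnt num1 num2 (z * num2 - o * num1) l := by
  intro l
  induction l with
  | nil => intro z o t; simp [pvCnt]
  | cons c l ih =>
    intro z o t
    by_cases hc : c = '0'
    · simp only [List.foldl_cons, hc, if_true]
      rw [ih, pvCnt]
      simp only [pvStep, if_true]
      have he : z * num2 - o * num1 + num2 = (z + 1) * num2 - o * num1 := by ring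
      have hcond : ((z + 1) * num2 = o * num1) ↔ ((z + 1) * num2 - o * num1 = 0) := sub_eq_zero.symm
      rw [he]
      by_cases h : (z + 1) * num2 - o * num1 = 0
      · rw [if_pos h, if_pos (hcond.mpr h)]; ring
      · rw [if_neg h, if_neg (fun hx => h (hcond.mp hx))]; ring
    · simp only [List.foldl_cons, hc, if_false]
      rw [ih, pvCnt]
      simp only [pvStep, hc, if_false]
      have he : z * num2 - o * num1 + -num1 = z * num2 - (o + 1) * num1 := by ring
      have hcond : (z * num2 = (o + 1) * num1) ↔ (z * num2 - (o + 1) * num1 = 0) := sub_eq_zero.symm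
      rw [he]
      by_cases h : z * num2 - (o + 1) * num1 = 0
      · rw [if_pos h, if_pos (hcond.mpr h)]; ring
      · rw [if_neg h, if_neg (fun hx => h (hcond.mp hx))]; ring

lemma pvB_fold_outer (num1 num2 : Int) : ∀ (cs : List Char) (total : Int),
    (List.range cs.length).foldl (fun t i => t + pvCnt num1 num2 0 (cs.drop i)) total
      = total + pvB num1 num2 cs := by
  intro cs
  induction cs with
  | nil => intro total; simp [pvB]
  | cons c cs ih =>
    intro total
    rw [List.length_cons, List.range_succ_eq_map]
    simp only [List.foldl_cons, List.foldl_map, List.drop_succ_cons, List.drop_zero]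
    rw [ih, pvB]
    ring

lemma pvAlt_eq (s : String) (num1 num2 : Int) :
    fixedRatio_alt s num1 num2 = pvB num1 num2 s.toList := by
  have hfun : (fun (total : Int) (start : Nat) =>
      ((PySem.List.slice s.toList (some (start : Int)) none).foldl
        (fun (st : Int × Int × Int) ch =>
          let z := if ch = '0' then st.1 + 1 else st.1
          let o := if ch = '0' then st.2.1 else st.2.1 + 1
          (z, o, if z * num2 = o * num1 then st.2.2 + 1 else st.2.2))
        (0, 0, total)).2.2)
      = fun (t : Int) (i : Nat) => t + pvCnt num1 num2 0 (s.toList.drop i) := by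
    funext t i
    rw [PySem.List.slice_from_natCast, pvB_fold_inner]
    norm_num
  unfold fixedRatio_alt
  rw [hfun, pvB_fold_outer]
  ring

lemma pvA_eq (s : String) (num1 num2 : Int) :
    fixedRatio s num1 num2 = pvGo num1 num2 0 [0] s.toList := by
  have h := pvA_fold num1 num2 s.toList (PySem.Dict.empty.insert 0 1) 0 0 0 [0]
    (by
      intro k
      rw [PySem.Dict.getD_insert]
      by_cases hk : k = 0
      · simp [hk]
      · simp [hk, PySem.Dict.getD_empty, Ne.symm hk])
    (by
      intro k
      rw [PySem.Dict.contains_insert]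
      by_cases hk : k = 0 <;> simp [hk, PySem.Dict.contains_empty])
  unfold fixedRatio
  rw [h]
  norm_num

-- ===== VERDICT (by name: the statement is the Claim_ definition above) =====
theorem fixedRatio_spec : Claim_equal_fixedRatio := by
  intro s num1 num2 _
  show fixedRatio s num1 num2 = fixedRatio_alt s num1 num2
  rw [pvA_eq, pvAlt_eq, pvGo_eq, pvB_eq]
  simp [pvS]
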